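-- pv_equiv track=rewrite | github.com/Simplstha/typing-speed-test | mechanism.py | calculate
-- ===== SOURCE A (Python) =====
-- def calculate(text, in_text):
--     score = 0
--     text_without_space = text.replace(" ", "")
--     text_list = list(text_without_space)
--     in_text_without_space = in_text.replace(" ", "")
--     in_text_list = list(in_text_without_space)
--     index = len(in_text_list) - 1
--     to_check_list = text_list[:index]
--     for l in in_text_list:
--         if l in to_check_list:
--             score += 1
--         else:
--             score += 0
--     return score
-- ===== SOURCE B (Python) =====
-- def calculate(text, in_text):
--     typed = in_text.replace(" ", "")
--     counts = {}
--     for c in typed: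
--         counts[c] = counts.get(c, 0) + 1
--     prefix = list(text.replace(" ", ""))[:len(typed) - 1]
--     return sum(counts.get(c, 0) for c in set(prefix))
-- ===== Notes on version B (the rewrite author's own statement) =====
-- stated objective: faster
-- what changed: Instead of scanning every typed char and testing membership in the prefix list (a linear scan each time), B tallies the space-stripped in_text into a dict in one pass and returns the sum of those tallies over the distinct chars of the prefix.
import Mathlib
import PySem

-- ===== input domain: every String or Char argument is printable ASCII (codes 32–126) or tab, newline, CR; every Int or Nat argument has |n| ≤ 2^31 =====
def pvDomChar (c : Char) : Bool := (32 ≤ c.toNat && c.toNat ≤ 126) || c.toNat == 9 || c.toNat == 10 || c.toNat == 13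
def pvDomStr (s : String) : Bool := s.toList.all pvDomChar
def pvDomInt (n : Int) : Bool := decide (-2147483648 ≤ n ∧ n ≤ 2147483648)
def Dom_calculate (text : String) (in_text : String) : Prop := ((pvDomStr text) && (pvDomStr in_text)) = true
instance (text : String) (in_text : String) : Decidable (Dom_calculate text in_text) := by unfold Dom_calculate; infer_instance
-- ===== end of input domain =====

-- B: one counting pass over the typed text plus a sum over the prefix's distinct chars, replacing A's per-char scan of the prefix list.

-- ===== PORT A =====
def calculate (text : String) (in_text : String) : Int :=
  let text_list := (PySem.Str.replace text " " "").toList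
  let in_text_list := (PySem.Str.replace in_text " " "").toList
  let index : Int := (in_text_list.length : Int) - 1
  let to_check_list := PySem.List.slice text_list none (some index)
  in_text_list.foldl (fun score l => if to_check_list.contains l then score + 1 else score + 0) 0

-- ===== PORT B =====
def calculate_alt (text : String) (in_text : String) : Int :=
  let typed := (PySem.Str.replace in_text " " "").toList
  let counts : PySem.Dict Char Int :=
    typed.foldl (fun d c => d.insert c (d.getD c 0 + 1)) PySem.Dict.empty
  let pref := PySem.List.slice (PySem.Str.replace text " " "").toList
    none (some ((typed.length : Int) - 1))
  ((PySem.Set.ofList pref).map (fun c => counts.getD c 0)).sum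

-- ===== PRECONDITION & SPEC =====
def Spec_calculate (text : String) (in_text : String) (out : Int) : Prop := out = calculate_alt text in_text
instance (text : String) (in_text : String) (out : Int) : Decidable (Spec_calculate text in_text out) := by unfold Spec_calculate; infer_instance

-- ===== CLAIM (what is proved, stated in full; the proofs are below) =====
def Claim_equal_calculate : Prop := ∀ (text : String) (in_text : String), Dom_calculate text in_text → Spec_calculate text in_text (calculate text in_text)

-- ===== LEMMAS AND PROOFS =====

-- summing the multiplicities of the distinct chars S over ins counts exactly ins's chars lying in S
theorem pv_sum_count_eq_countP (S : List Char) (hS : S.Nodup) (ins : List Char) :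
    (S.map (fun c => (ins.count c : Int))).sum = (ins.countP (fun l => S.contains l) : Int) := by
  induction ins with
  | nil => simp
  | cons l t ih =>
    simp only [List.count_cons, List.countP_cons, Nat.cast_add, Nat.cast_ite, Nat.cast_one,
      Nat.cast_zero]
    rw [PySem.List.sum_map_add_int, ih, PySem.List.sum_map_ite_one_zero]
    have h1 : S.countP (BEq.beq l) = S.count l := by
      apply List.countP_congr
      intro a _
      simp only [beq_iff_eq]
      exact eq_comm
    have hcnt : S.countP (BEq.beq l) = if S.contains l = true then 1 else 0 := by
      rw [h1]
      by_cases h : l ∈ S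
      · simp [h, List.count_eq_one_of_mem hS h]
      · simp [h, List.count_eq_zero_of_not_mem h]
    rw [hcnt]
    split_ifs with h <;> simp

-- ===== VERDICT (by name: the statement is the Claim_ definition above) =====
set_option maxHeartbeats 1000000 in
theorem calculate_spec : Claim_equal_calculate := by
  intro text in_text _
  show calculate text in_text = calculate_alt text in_text
  simp only [calculate, calculate_alt]
  simp only [add_zero]
  rw [PySem.List.foldl_if_add_one, PySem.Dict.foldl_insert_getD_add_one_eq_counter]
  simp only [PySem.Dict.getD_counter]
  rw [pv_sum_count_eq_countP _ (PySem.Set.nodup_ofList _), zero_add]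
  congr 1
  apply List.countP_congr
  intro l _
  simp [PySem.Set.mem_ofList]
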